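-- pv_equiv track=rewrite | github.com/shlykovdi/python-algorithms-and-data-structures | lesson-4/task-1/impl_1.py | search_numbers
-- ===== SOURCE A (Python) =====
-- def search_numbers(search_range: int, check_range: int) -> int:
--     counter = 0
--
--     for a in range(2, search_range):
--         for b in range(2, check_range):
--             if a % b:
--                 break
--         else:
--             counter += 1
--
--     return counter
-- ===== SOURCE B (Python) =====
-- def search_numbers(search_range: int, check_range: int) -> int:
--     # lcm of 2..check_range-1, then count its multiples in [2, search_range)
--     lcm = 1
--     for b in range(2, check_range):
--         if lcm > search_range:
--             break  # lcm only grows; no multiple can fall below search_range anymore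
--         x, y = lcm, b
--         while y:
--             x, y = y, x % y
--         lcm = lcm // x * b
--     return max(0, (search_range - 1) // lcm - 1 // lcm)
-- ===== Notes on version B (the rewrite author's own statement) =====
-- stated objective: faster
-- what changed: Instead of testing every candidate a in [2, search_range) against each divisor, B computes L = lcm(2..check_range-1) once with Euclid's algorithm and counts the multiples of L in the interval with one closed-form floor division.
import Mathlib
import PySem

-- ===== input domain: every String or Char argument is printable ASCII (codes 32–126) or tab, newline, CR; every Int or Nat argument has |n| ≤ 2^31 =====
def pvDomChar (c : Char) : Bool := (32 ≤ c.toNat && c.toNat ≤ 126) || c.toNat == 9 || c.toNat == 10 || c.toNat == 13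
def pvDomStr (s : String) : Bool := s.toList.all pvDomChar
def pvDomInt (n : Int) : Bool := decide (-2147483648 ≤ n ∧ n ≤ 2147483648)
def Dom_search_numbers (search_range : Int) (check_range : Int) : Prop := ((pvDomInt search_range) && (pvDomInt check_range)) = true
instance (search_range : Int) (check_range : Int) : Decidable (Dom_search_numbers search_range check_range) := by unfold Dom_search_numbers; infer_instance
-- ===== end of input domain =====

-- B replaces A's trial of every a in [2, search_range) by computing lcm(2..check_range-1)
-- once (Euclid) and counting its multiples with one closed-form division: objective 'faster'.

-- ===== PORT A =====
-- inner 'for b in range(2, check_range): if a % b: break / else: counter += 1'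
-- (range is consumed lazily with the break, so the loop is a recursion on b, not a list)
def pvInnerLoop (a b c : Int) : Bool :=
  if b < c then (if PySem.Int.mod a b ≠ 0 then false else pvInnerLoop a (b + 1) c) else true
termination_by (c - b).toNat

def search_numbers (search_range : Int) (check_range : Int) : Int :=
  (PySem.List.pyRange 2 search_range 1).foldl
    (fun counter a =>
      if pvInnerLoop a 2 check_range then counter + 1 else counter)
    0

-- ===== PORT B =====
-- 'x, y = lcm, b; while y: x, y = y, x % y' — Python's floor mod via PySem.Int.mod
def pvGcd (x y : Int) : Int :=
  if y = 0 then x else pvGcd y (PySem.Int.mod x y)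
termination_by y.natAbs
decreasing_by
  rename_i h
  rcases lt_or_gt_of_ne h with hneg | hpos
  · have := PySem.Int.mod_neg_bounds (a := x) hneg; omega
  · have h1 := PySem.Int.mod_nonneg (a := x) hpos
    have h2 := PySem.Int.mod_lt (a := x) hpos
    omega

-- 'for b in range(2, check_range): if lcm > search_range: break; …' — lazy range with break,
-- so the loop is a recursion on b
def pvLcmLoop (s b c lcm : Int) : Int :=
  if b < c then
    if lcm > s then lcm
    else pvLcmLoop s (b + 1) c (PySem.Int.floordiv lcm (pvGcd lcm b) * b)
  else lcm
termination_by (c - b).toNat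

def search_numbers_alt (search_range : Int) (check_range : Int) : Int :=
  let lcm := pvLcmLoop search_range 2 check_range 1
  max 0 (PySem.Int.floordiv (search_range - 1) lcm - PySem.Int.floordiv 1 lcm)

-- ===== PRECONDITION & SPEC =====
def Spec_search_numbers (search_range : Int) (check_range : Int) (out : Int) : Prop := out = search_numbers_alt search_range check_range
instance (search_range : Int) (check_range : Int) (out : Int) : Decidable (Spec_search_numbers search_range check_range out) := by unfold Spec_search_numbers; infer_instance

-- ===== CLAIM (what is proved, stated in full; the proofs are below) =====
def Claim_equal_search_numbers : Prop := ∀ (search_range : Int) (check_range : Int), Dom_search_numbers search_range check_range → Spec_search_numbers search_range check_range (search_numbers search_range check_range)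

-- ===== LEMMAS AND PROOFS =====

theorem pvGcd_eq (x y : Int) (hx : 0 ≤ x) (hy : 0 ≤ y) : pvGcd x y = Int.gcd x y := by
  by_cases h : y = 0
  · subst h; rw [pvGcd]; simp [Int.gcd, Int.natAbs_of_nonneg hx]
  · have hy' : 0 < y := lt_of_le_of_ne hy (Ne.symm h)
    rw [pvGcd, if_neg h, PySem.Int.mod_eq_emod_of_pos hy',
      pvGcd_eq y (x % y) hy (Int.emod_nonneg x (by omega))]
    rw [Int.gcd_comm y, Int.gcd_emod]
termination_by y.natAbs
decreasing_by
  have h2 := Int.emod_lt_of_pos x (b := y) (by omega)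
  have h1 := Int.emod_nonneg x (show y ≠ 0 by omega)
  omega

theorem pvInnerLoop_iff (a b c : Int) :
    pvInnerLoop a b c = true ↔ ∀ x ∈ PySem.List.pyRange b c 1, x ∣ a := by
  by_cases hbc : b < c
  · rw [pvInnerLoop, if_pos hbc, PySem.List.pyRange_one_cons hbc]
    by_cases h : PySem.Int.mod a b = 0
    · have hd : b ∣ a := (PySem.Int.mod_eq_zero_iff_dvd a b).mp h
      simp [h, pvInnerLoop_iff a (b + 1) c, hd]
    · have hd : ¬ b ∣ a := fun hb => h ((PySem.Int.mod_eq_zero_iff_dvd a b).mpr hb)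
      simp [h, hd]
  · rw [pvInnerLoop, if_neg hbc, PySem.List.pyRange_one_eq_nil (by omega)]
    simp
termination_by (c - b).toNat

theorem gcd_mul_lcm_int (l b : Int) (hl : 0 < l) (hb : 0 < b) :
    (Int.gcd l b : Int) * (Int.lcm l b : Int) = l * b := by
  unfold Int.lcm Int.gcd
  rw [← Nat.cast_mul, Nat.gcd_mul_lcm]
  simp [Int.natAbs_of_nonneg hl.le, Int.natAbs_of_nonneg hb.le]

-- one lcm step of B equals the mathematical lcm
theorem step_eq_lcm (l b : Int) (hl : 0 < l) (hb : 0 < b) :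
    PySem.Int.floordiv l (pvGcd l b) * b = (Int.lcm l b : Int) := by
  have hg : (Int.gcd l b : Int) ∣ l := Int.gcd_dvd_left l b
  have hgpos : (0 : Int) < Int.gcd l b := by positivity
  rw [pvGcd_eq l b hl.le hb.le, PySem.Int.floordiv_eq_ediv_of_pos hgpos]
  apply mul_right_cancel₀ (b := (Int.gcd l b : Int)) hgpos.ne'
  calc l / (Int.gcd l b : Int) * b * (Int.gcd l b : Int)
      = l / (Int.gcd l b : Int) * (Int.gcd l b : Int) * b := by ring
    _ = l * b := by rw [Int.ediv_mul_cancel hg]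
    _ = (Int.lcm l b : Int) * (Int.gcd l b : Int) := by
        rw [mul_comm ((Int.lcm l b : Int))]; exact (gcd_mul_lcm_int l b hl hb).symm

-- B's fold computes a positive number dividing exactly the common multiples
theorem fold_lcm_spec (l : List Int) (hpos : ∀ b ∈ l, 0 < b) :
    ∀ init : Int, 0 < init →
      0 < l.foldl (fun l b => PySem.Int.floordiv l (pvGcd l b) * b) init ∧
      ∀ a : Int, l.foldl (fun l b => PySem.Int.floordiv l (pvGcd l b) * b) init ∣ a ↔
        init ∣ a ∧ ∀ b ∈ l, b ∣ a := by
  induction l with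
  | nil => intro init hinit; simpa using hinit
  | cons b rest ih =>
    intro init hinit
    have hb : 0 < b := hpos b (List.mem_cons_self)
    have hrest : ∀ x ∈ rest, 0 < x := fun x hx => hpos x (List.mem_cons_of_mem b hx)
    have hm : 0 < (Int.lcm init b : Int) := by exact_mod_cast Int.lcm_pos hinit.ne' hb.ne'
    rw [List.foldl_cons, step_eq_lcm init b hinit hb]
    obtain ⟨h1, h2⟩ := ih hrest (Int.lcm init b : Int) hm
    refine ⟨h1, fun a => ?_⟩
    rw [h2 a, Int.coe_lcm_dvd_iff]
    simp only [List.forall_mem_cons]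
    tauto

-- one step of the division count: s // L minus (s-1) // L is the indicator of L ∣ s
theorem floordiv_succ (L s : Int) (hL : 0 < L) :
    PySem.Int.floordiv s L = PySem.Int.floordiv (s - 1) L + (if L ∣ s then 1 else 0) := by
  rw [PySem.Int.floordiv_eq_ediv_of_pos hL, PySem.Int.floordiv_eq_ediv_of_pos hL]
  split_ifs with hdvd
  · obtain ⟨k, hk⟩ := hdvd
    subst hk
    have e1 : L * k / L = k := Int.mul_ediv_cancel_left k hL.ne'
    have e2 : (L * k - 1) / L = k - 1 := by
      have h1 : L * k - 1 = (L - 1) + (k - 1) * L := by ring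
      rw [h1, Int.add_mul_ediv_right _ _ hL.ne']
      have h0 : (L - 1) / L = 0 := Int.ediv_eq_zero_of_lt (by omega) (by omega)
      rw [h0]; ring
    rw [e1, e2]; ring
  · have hr0 : s % L ≠ 0 := fun h0 => hdvd (Int.dvd_of_emod_eq_zero h0)
    have hrpos : 0 ≤ s % L := Int.emod_nonneg s hL.ne'
    have hrlt : s % L < L := Int.emod_lt_of_pos s hL
    have key : s - 1 = (s % L - 1) + (s / L) * L := by
      have h := Int.mul_ediv_add_emod s L
      linarith [h]
    have e2 : (s - 1) / L = s / L := by
      rw [key, Int.add_mul_ediv_right _ _ hL.ne']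
      have h0 : (s % L - 1) / L = 0 := Int.ediv_eq_zero_of_lt (by omega) (by omega)
      rw [h0]; ring
    rw [e2]; ring

-- counting multiples of L in [2, 2+n) in A's loop order equals the division formula
theorem count_pyRange (L : Int) (hL : 0 < L) (n : Nat) :
    (PySem.List.pyRange 2 (2 + (n : Int)) 1).foldl
        (fun c a => if L ∣ a then c + 1 else c) 0
      = PySem.Int.floordiv (1 + (n : Int)) L - PySem.Int.floordiv 1 L := by
  induction n with
  | zero => simp [PySem.List.pyRange_one_eq_nil (by omega : (2:Int) ≤ 2)]
  | succ n ih =>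
    have hcast : (2 : Int) + ((n + 1 : Nat) : Int) = (2 + (n : Int)) + 1 := by push_cast; ring
    rw [hcast, PySem.List.pyRange_one_succ_right (by omega), List.foldl_append]
    simp only [List.foldl_cons, List.foldl_nil]
    rw [ih]
    have hs : (1 : Int) + ((n + 1 : Nat) : Int) = 2 + (n : Int) := by push_cast; ring
    rw [hs, floordiv_succ L (2 + (n : Int)) hL]
    have harg : (2 + (n : Int)) - 1 = 1 + (n : Int) := by ring
    rw [harg]
    split_ifs <;> omega

-- A's loop condition is exactly divisibility by B's lcm
theorem cond_eq (c L : Int)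
    (hLdvd : ∀ a : Int, L ∣ a ↔ (1 : Int) ∣ a ∧ ∀ b ∈ PySem.List.pyRange 2 c 1, b ∣ a) :
    (fun (counter : Int) (a : Int) =>
        if pvInnerLoop a 2 c then counter + 1 else counter)
      = (fun (counter : Int) (a : Int) => if L ∣ a then counter + 1 else counter) := by
  funext counter a
  have : pvInnerLoop a 2 c = true ↔ L ∣ a := by
    rw [pvInnerLoop_iff, hLdvd a]
    simp
  by_cases h : L ∣ a
  · simp [h, this.mpr h]
  · have : ¬ pvInnerLoop a 2 c = true := fun ht => h (this.mp ht)
    simp [h, this]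

theorem floordiv_mono (a b L : Int) (hL : 0 < L) (hab : a ≤ b) :
    PySem.Int.floordiv a L ≤ PySem.Int.floordiv b L := by
  rw [PySem.Int.floordiv_eq_ediv_of_pos hL, PySem.Int.floordiv_eq_ediv_of_pos hL]
  exact Int.ediv_le_ediv hL hab

-- ===== VERDICT (by name: the statement is the Claim_ definition above) =====
-- A's value in closed form: the division formula at the full lcm of 2..c-1
theorem A_closed (s c : Int) :
    search_numbers s c =
      max 0 (PySem.Int.floordiv (s - 1)
          ((PySem.List.pyRange 2 c 1).foldl (fun l b => PySem.Int.floordiv l (pvGcd l b) * b) 1)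
        - PySem.Int.floordiv 1
          ((PySem.List.pyRange 2 c 1).foldl (fun l b => PySem.Int.floordiv l (pvGcd l b) * b) 1)) := by
  simp only [search_numbers]
  have hpos : ∀ b ∈ PySem.List.pyRange 2 c 1, 0 < b := by
    intro b hb; rw [PySem.List.mem_pyRange_one] at hb; omega
  obtain ⟨hLpos, hLdvd⟩ := fold_lcm_spec (PySem.List.pyRange 2 c 1) hpos 1 one_pos
  set L := (PySem.List.pyRange 2 c 1).foldl
    (fun l b => PySem.Int.floordiv l (pvGcd l b) * b) 1 with hLdef
  rw [cond_eq c L hLdvd]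
  by_cases h2 : 2 ≤ s
  · have hge : PySem.Int.floordiv 1 L ≤ PySem.Int.floordiv (s - 1) L :=
      floordiv_mono 1 (s - 1) L hLpos (by omega)
    have hcount := count_pyRange L hLpos (s - 2).toNat
    have e1 : (2 : Int) + ((s - 2).toNat : Int) = s := by omega
    have e2 : (1 : Int) + ((s - 2).toNat : Int) = s - 1 := by omega
    rw [e1, e2] at hcount
    rw [hcount, max_eq_right (by omega)]
  · rw [PySem.List.pyRange_one_eq_nil (by omega : s ≤ 2)]
    have hge : PySem.Int.floordiv (s - 1) L ≤ PySem.Int.floordiv 1 L :=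
      floordiv_mono (s - 1) 1 L hLpos (by omega)
    simp only [List.foldl_nil]
    rw [max_eq_left (by omega)]

-- when the modulus exceeds the range the formula gives 0
theorem zero_of_big (s L : Int) (hL : 0 < L) (hs : s < L) :
    max 0 (PySem.Int.floordiv (s - 1) L - PySem.Int.floordiv 1 L) = 0 := by
  by_cases h1 : L = 1
  · rw [h1] at hs ⊢
    rw [PySem.Int.floordiv_eq_ediv_of_pos one_pos,
      PySem.Int.floordiv_eq_ediv_of_pos one_pos, Int.ediv_one, Int.ediv_one,
      max_eq_left (by omega)]
  · have h2 : 1 < L := by omega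
    have e1 : PySem.Int.floordiv 1 L = 0 := by
      rw [PySem.Int.floordiv_eq_ediv_of_pos hL]
      exact Int.ediv_eq_zero_of_lt (by omega) (by omega)
    have e3 : PySem.Int.floordiv (L - 1) L = 0 := by
      rw [PySem.Int.floordiv_eq_ediv_of_pos hL]
      exact Int.ediv_eq_zero_of_lt (by omega) (by omega)
    have e2 : PySem.Int.floordiv (s - 1) L ≤ PySem.Int.floordiv (L - 1) L :=
      floordiv_mono (s - 1) (L - 1) L hL (by omega)
    rw [max_eq_left (by omega)]

-- B's loop either runs the whole fold, or breaks with a positive value > s dividing the full fold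
theorem pvLcmLoop_spec (s c b init : Int) (hinit : 0 < init)
    (hpos : ∀ x ∈ PySem.List.pyRange b c 1, 0 < x) :
    pvLcmLoop s b c init
        = (PySem.List.pyRange b c 1).foldl (fun l b => PySem.Int.floordiv l (pvGcd l b) * b) init ∨
      (0 < pvLcmLoop s b c init ∧ s < pvLcmLoop s b c init ∧
        pvLcmLoop s b c init ∣
          (PySem.List.pyRange b c 1).foldl (fun l b => PySem.Int.floordiv l (pvGcd l b) * b) init) := by
  by_cases hbc : b < c
  · rw [pvLcmLoop, if_pos hbc]
    by_cases hbreak : init > s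
    · rw [if_pos hbreak]
      right
      refine ⟨hinit, hbreak, ?_⟩
      obtain ⟨_, hdvd⟩ := fold_lcm_spec (PySem.List.pyRange b c 1) hpos init hinit
      exact ((hdvd _).mp dvd_rfl).1
    · rw [if_neg hbreak]
      have hb : 0 < b := hpos b (by rw [PySem.List.mem_pyRange_one]; omega)
      have hinit' : 0 < PySem.Int.floordiv init (pvGcd init b) * b := by
        rw [step_eq_lcm init b hinit hb]
        exact_mod_cast Int.lcm_pos hinit.ne' hb.ne'
      have hpos' : ∀ x ∈ PySem.List.pyRange (b + 1) c 1, 0 < x := by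
        intro x hx
        exact hpos x (by rw [PySem.List.mem_pyRange_one] at hx ⊢; omega)
      have := pvLcmLoop_spec s c (b + 1) (PySem.Int.floordiv init (pvGcd init b) * b) hinit' hpos'
      rw [PySem.List.pyRange_one_cons hbc, List.foldl_cons]
      exact this
  · rw [pvLcmLoop, if_neg hbc, PySem.List.pyRange_one_eq_nil (by omega), List.foldl_nil]
    left; rfl
termination_by (c - b).toNat

theorem search_numbers_spec : Claim_equal_search_numbers := by
  intro s c _hdom
  simp only [Spec_search_numbers, search_numbers_alt]
  rw [A_closed s c]
  have hpos : ∀ b ∈ PySem.List.pyRange 2 c 1, 0 < b := by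
    intro b hb; rw [PySem.List.mem_pyRange_one] at hb; omega
  have hLfpos := (fold_lcm_spec (PySem.List.pyRange 2 c 1) hpos 1 one_pos).1
  rcases pvLcmLoop_spec s c 2 1 one_pos hpos with h | ⟨hp, hgt, hdvd⟩
  · rw [h]
  · have hle := Int.le_of_dvd hLfpos hdvd
    rw [zero_of_big s _ hLfpos (by omega), zero_of_big s _ hp hgt]
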